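-- pv_equiv track=rewrite | github.com/tsdaemon/kaggle-grocery | model.py | get_two_week_ranges
-- ===== SOURCE A (Python) =====
-- def get_two_week_ranges(num, end_index):
--     ranges = []
--     for i in range(num):
--         week2end = end_index
--         week2start = end_index-13
--         week1end = end_index-14
--         week1start = end_index-27
--         ranges.append((list(range(week2start, week2end+1)), list(range(week1start, week1end+1))))
--         end_index -= 14
--     return ranges
-- ===== SOURCE B (Python) =====
-- def get_two_week_ranges(num, end_index):
--     blocks = [list(range(end_index - 13 - 14 * j, end_index + 1 - 14 * j))
--               for j in range(num + 1)]
--     return [(list(blocks[i]), list(blocks[i + 1])) for i in range(num)]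
-- ===== Notes on version B (the rewrite author's own statement) =====
-- stated objective: simpler
-- what changed: B precomputes the num+1 two-week blocks once (consecutive tuples share a block) and emits the result as a size-2 sliding window over that table, instead of A's loop that mutates end_index and rebuilds both ranges each iteration.
import Mathlib
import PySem

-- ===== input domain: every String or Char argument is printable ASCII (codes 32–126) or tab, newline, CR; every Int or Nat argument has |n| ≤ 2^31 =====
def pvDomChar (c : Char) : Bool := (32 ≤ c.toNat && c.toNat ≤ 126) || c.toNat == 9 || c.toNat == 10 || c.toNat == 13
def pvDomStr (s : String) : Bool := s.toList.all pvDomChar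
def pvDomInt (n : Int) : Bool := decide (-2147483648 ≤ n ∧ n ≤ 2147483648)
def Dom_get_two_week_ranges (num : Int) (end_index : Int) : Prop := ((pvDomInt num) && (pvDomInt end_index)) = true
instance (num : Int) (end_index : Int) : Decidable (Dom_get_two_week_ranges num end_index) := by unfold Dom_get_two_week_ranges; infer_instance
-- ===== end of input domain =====

-- B replaces A's mutating per-iteration recomputation with a precomputed block table plus a
-- size-2 sliding window (simpler decomposition, same cost). Both programs are total.

-- ===== PORT A =====
-- A: loop over range(num), appending the pair of ranges and decrementing end_index by 14.
def get_two_week_ranges (num : Int) (end_index : Int) : List (List Int × List Int) :=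
  let st := (PySem.List.pyRange 0 num 1).foldl
    (fun (st : List (List Int × List Int) × Int) _ =>
      let e := st.2
      let week2end := e
      let week2start := e - 13
      let week1end := e - 14
      let week1start := e - 27
      (st.1 ++ [(PySem.List.pyRange week2start (week2end + 1) 1,
                 PySem.List.pyRange week1start (week1end + 1) 1)], e - 14))
    ([], end_index)
  st.1

-- ===== PORT B =====
-- B: table of num+1 blocks, then a sliding window of size 2 (each block copied, like Source B's list()).
def get_two_week_ranges_alt (num : Int) (end_index : Int) : List (List Int × List Int) :=
  let blocks := (PySem.List.pyRange 0 (num + 1) 1).map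
    (fun j => PySem.List.pyRange (end_index - 13 - 14 * j) (end_index + 1 - 14 * j) 1)
  (PySem.List.pyRange 0 num 1).map
    (fun i => (PySem.List.pyGetD blocks i [], PySem.List.pyGetD blocks (i + 1) []))

-- ===== PRECONDITION & SPEC =====
def Spec_get_two_week_ranges (num : Int) (end_index : Int) (out : List (List Int × List Int)) : Prop := out = get_two_week_ranges_alt num end_index
instance (num : Int) (end_index : Int) (out : List (List Int × List Int)) : Decidable (Spec_get_two_week_ranges num end_index out) := by unfold Spec_get_two_week_ranges; infer_instance

-- ===== CLAIM (what is proved, stated in full; the proofs are below) =====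
def Claim_equal_get_two_week_ranges : Prop := ∀ (num : Int) (end_index : Int), Dom_get_two_week_ranges num end_index → Spec_get_two_week_ranges num end_index (get_two_week_ranges num end_index)

-- ===== LEMMAS AND PROOFS =====

def pvPair (e : Int) : List Int × List Int :=
  (PySem.List.pyRange (e - 13) (e + 1) 1, PySem.List.pyRange (e - 27) (e - 13) 1)

-- A's fold, characterised: the accumulator gains one pair per element, shifted by 14 each step.
theorem pvFoldA (l : List Int) (acc : List (List Int × List Int)) (e : Int) :
    l.foldl
      (fun (st : List (List Int × List Int) × Int) _ =>
        (st.1 ++ [(PySem.List.pyRange (st.2 - 13) (st.2 + 1) 1,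
                   PySem.List.pyRange (st.2 - 27) (st.2 - 14 + 1) 1)], st.2 - 14))
      (acc, e)
    = (acc ++ (List.range l.length).map (fun k : Nat => pvPair (e - 14 * (k : Int))),
       e - 14 * l.length) := by
  induction l generalizing acc e with
  | nil => simp
  | cons x xs ih =>
    simp only [List.foldl_cons, ih, List.length_cons, List.range_succ_eq_map,
      List.map_cons, List.map_map, Prod.mk.injEq]
    refine ⟨?_, by push_cast; ring⟩
    rw [List.append_assoc]
    congr 1
    rw [List.singleton_append]
    congr 1
    · simp only [pvPair, Nat.cast_zero, Prod.mk.injEq]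
      constructor <;> congr 1 <;> ring
    · apply List.map_congr_left
      intro k _
      simp only [Function.comp_apply, pvPair, Prod.mk.injEq]
      constructor <;> congr 1 <;> push_cast <;> ring

theorem get_two_week_ranges_eq (num e : Int) :
    get_two_week_ranges num e
      = (List.range (PySem.List.pyRange 0 num 1).length).map
          (fun k : Nat => pvPair (e - 14 * (k : Int))) := by
  unfold get_two_week_ranges
  rw [pvFoldA]
  simp

-- ===== VERDICT (by name: the statement is the Claim_ definition above) =====
theorem get_two_week_ranges_spec : Claim_equal_get_two_week_ranges := by
  intro num e _
  unfold Spec_get_two_week_ranges get_two_week_ranges_alt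
  rw [get_two_week_ranges_eq]
  simp only [PySem.List.length_pyRange_one, Int.sub_zero]
  conv_rhs => rw [PySem.List.pyRange_one 0 num]
  rw [List.map_map]
  simp only [Int.sub_zero, Int.zero_add]
  apply List.map_congr_left
  intro k hk
  have hk' : k < num.toNat := List.mem_range.mp hk
  have hnum : ((k : Int)) < num := by omega
  simp only [Function.comp_apply]
  rw [PySem.List.pyGetD_map_pyRange_of_nonneg _ _ _ _ (by omega) (by omega),
      PySem.List.pyGetD_map_pyRange_of_nonneg _ _ _ _ (by omega) (by omega)]
  simp only [pvPair, Prod.mk.injEq]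
  constructor <;> congr 1 <;> ring
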